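-- pv_equiv track=rewrite | github.com/Abhishek-Punhani/agentinvest | quant-stream/quant_stream/factors/evaluator.py | _parse_function_call
-- ===== SOURCE A (Python) =====
-- def _parse_function_call(expr: str) -> tuple:
--     """Parse a function call expression.
--
--     Args:
--         expr: Function call string like "DELTA($close, 1)"
--
--     Returns:
--         Tuple of (function_name, args_list)
--     """
--     expr = expr.strip()
--     if not expr or "(" not in expr or not expr[0].isalpha():
--         return None, None
--
--     # Find the first opening parenthesis that starts the call
--     first_paren = expr.find("(")
--     func_name = expr[:first_paren].strip()
--
--     if not func_name.isidentifier():
--         return None, None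
--
--     args_str = expr[first_paren + 1 :]
--     depth = 1
--     closing_index = None
--
--     for idx, ch in enumerate(args_str):
--         if ch in "([{":
--             depth += 1
--         elif ch in ")]}":
--             depth -= 1
--             if depth == 0:
--                 closing_index = idx
--                 break
--
--     if closing_index is None:
--         return None, None
--
--     # Ensure there are no trailing characters after the closing parenthesis
--     trailing = args_str[closing_index + 1 :].strip()
--     if trailing:
--         return None, None
--
--     args_section = args_str[:closing_index]
--
--     # Parse arguments (simple split by comma, accounting for nested parens)
--     args = []
--     depth = 0
--     current_arg = ""
--
--     for char in args_section:
--         if char in "([{":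
--             depth += 1
--             current_arg += char
--         elif char in ")]}":
--             depth -= 1
--             current_arg += char
--         elif char == "," and depth == 0:
--             args.append(current_arg.strip())
--             current_arg = ""
--         else:
--             current_arg += char
--
--     if current_arg.strip():
--         args.append(current_arg.strip())
--
--     return func_name, args
-- ===== SOURCE B (Python) =====
-- def _parse_function_call(expr: str) -> tuple:
--     """Parse a function call expression (depth-array + index-slicing decomposition)."""
--     expr = expr.strip()
--     if not expr or "(" not in expr or not expr[0].isalpha():
--         return None, None
--
--     first = expr.find("(")
--     name = expr[:first].strip()
--     if not name.isidentifier():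
--         return None, None
--
--     s = expr[first + 1:]
--
--     # Running bracket depth *after* each character, starting from 1.
--     depths = []
--     d = 1
--     for c in s:
--         d += (c in "([{") - (c in ")]}")
--         depths.append(d)
--
--     if 0 not in depths:
--         return None, None
--     close = depths.index(0)
--     if s[close + 1:].strip():
--         return None, None
--
--     section = s[:close]
--     # Top-level commas are exactly the commas sitting at depth 1.
--     cuts = [i for i in range(close) if section[i] == "," and depths[i] == 1]
--
--     args = []
--     start = 0
--     for i in cuts:
--         args.append(section[start:i].strip())
--         start = i + 1
--     last = section[start:].strip()
--     if last:
--         args.append(last)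
--     return name, args
-- ===== Notes on version B (the rewrite author's own statement) =====
-- stated objective: alternative
-- what changed: A's two on-line depth-tracking scans (find the closing bracket, then re-scan the section splitting on depth-0 commas with an accumulator) are replaced by a staged array decomposition: precompute the running depth list, take its first zero as the closing index, select comma positions at depth 1 by index filtering, and slice the section at those cut positions.
import Mathlib
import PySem

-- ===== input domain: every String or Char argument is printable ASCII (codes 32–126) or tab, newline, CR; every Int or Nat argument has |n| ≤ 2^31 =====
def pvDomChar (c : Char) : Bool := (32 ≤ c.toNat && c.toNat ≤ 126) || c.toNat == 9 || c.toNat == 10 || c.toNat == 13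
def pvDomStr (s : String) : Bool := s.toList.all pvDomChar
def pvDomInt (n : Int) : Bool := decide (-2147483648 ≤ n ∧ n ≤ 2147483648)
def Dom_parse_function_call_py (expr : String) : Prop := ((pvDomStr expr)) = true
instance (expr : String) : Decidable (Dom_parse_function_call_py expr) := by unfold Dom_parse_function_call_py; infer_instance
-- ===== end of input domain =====

-- B replaces A's two on-line depth-tracking scans by a staged decomposition: precompute the
-- running depth array, take its first zero as the closing index, filter comma positions at
-- depth 1, and slice the argument sec at those cuts (objective: alternative, same cost).


-- ===== PORT A =====
-- shared character classes (the Python literals "([{" / ")]}")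
def pvIsOpen (c : Char) : Bool := c == '(' || c == '[' || c == '{'
def pvIsClose (c : Char) : Bool := c == ')' || c == ']' || c == '}'

-- str.isidentifier, hand-ported: exact on the ASCII domain (first char letter or '_',
-- rest alphanumeric or '_'); non-ASCII identifier characters do not occur in Dom.
def pvIdentChar (c : Char) : Bool := PySem.Chars.isalnum c || c == '_'
def pvIsIdentifier : List Char → Bool
  | [] => false
  | c :: rest => (PySem.Chars.isalpha c || c == '_') && rest.all pvIdentChar

-- A's first scan: index of the bracket closing the call (depth starts at 1)
def pvFindClose : List Char → Int → Option Nat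
  | [], _ => none
  | c :: rest, depth =>
    if pvIsOpen c then (pvFindClose rest (depth + 1)).map Nat.succ
    else if pvIsClose c then
      if depth - 1 == 0 then some 0 else (pvFindClose rest (depth - 1)).map Nat.succ
    else (pvFindClose rest depth).map Nat.succ

-- A's second scan: split the argument sec on depth-0 commas
def pvSplitArgs : List Char → Int → List Char → List (List Char) → List (List Char)
  | [], _, cur, args =>
      if (PySem.Chars.strip cur).isEmpty then args else args ++ [PySem.Chars.strip cur]
  | c :: rest, depth, cur, args =>
    if pvIsOpen c then pvSplitArgs rest (depth + 1) (cur ++ [c]) args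
    else if pvIsClose c then pvSplitArgs rest (depth - 1) (cur ++ [c]) args
    else if c == ',' && depth == 0 then pvSplitArgs rest depth [] (args ++ [PySem.Chars.strip cur])
    else pvSplitArgs rest depth (cur ++ [c]) args

def parse_function_call_py (expr : String) : Option String × Option (List String) :=
  let e := PySem.Chars.strip expr.toList
  match e with
  | [] => (none, none)
  | c0 :: _ =>
    if !PySem.Chars.isIn ['('] e then (none, none)
    else if !PySem.Chars.isalpha c0 then (none, none)
    else
      -- find ≥ 0 here since '(' ∈ e, so .toNat is exact
      let fp := (PySem.Chars.find e ['(']).toNat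
      let funcName := PySem.Chars.strip (e.take fp)    -- expr[:fp] with fp ≥ 0 is take fp
      if !pvIsIdentifier funcName then (none, none)
      else
        let argsStr := e.drop (fp + 1)                 -- expr[fp+1:]
        match pvFindClose argsStr 1 with
        | none => (none, none)
        | some k =>
          if !(PySem.Chars.strip (argsStr.drop (k + 1))).isEmpty then (none, none)
          else
            let args := pvSplitArgs (argsStr.take k) 0 [] []
            (some (String.ofList funcName), some (args.map String.ofList))

-- ===== PORT B =====
-- per-character depth change: (c in "([{") - (c in ")]}")
def pvDelta (c : Char) : Int := (if pvIsOpen c then 1 else 0) - (if pvIsClose c then 1 else 0)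

-- the `depths` list: running bracket depth after each character, starting from d
def pvDepths : List Char → Int → List Int
  | [], _ => []
  | c :: rest, d => (d + pvDelta c) :: pvDepths rest (d + pvDelta c)

-- the slicing loop: section[start:i].strip() for each cut i, then the final piece
-- (section[a:b] with 0 ≤ a ≤ b is exactly (drop a).take (b - a))
def pvSlices (sec : List Char) : List Nat → Nat → List (List Char)
  | [], start =>
      let last := PySem.Chars.strip (sec.drop start)
      if last.isEmpty then [] else [last]
  | i :: rest, start =>
      PySem.Chars.strip ((sec.drop start).take (i - start)) :: pvSlices sec rest (i + 1)

def parse_function_call_py_alt (expr : String) : Option String × Option (List String) :=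
  let e := PySem.Chars.strip expr.toList
  match e with
  | [] => (none, none)
  | c0 :: _ =>
    if !PySem.Chars.isIn ['('] e then (none, none)
    else if !PySem.Chars.isalpha c0 then (none, none)
    else
      let fp := (PySem.Chars.find e ['(']).toNat
      let funcName := PySem.Chars.strip (e.take fp)
      if !pvIsIdentifier funcName then (none, none)
      else
        let s := e.drop (fp + 1)
        let depths := pvDepths s 1
        -- '0 not in depths' / 'depths.index(0)' fused as the first index of 0
        match depths.idxOf? 0 with
        | none => (none, none)
        | some close =>
          if !(PySem.Chars.strip (s.drop (close + 1))).isEmpty then (none, none)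
          else
            let sec := s.take close
            let cuts := (List.range close).filter
              (fun i => sec[i]? == some ',' && depths[i]? == some (1 : Int))
            (some (String.ofList funcName), some ((pvSlices sec cuts 0).map String.ofList))

-- ===== PRECONDITION & SPEC =====
def Spec_parse_function_call_py (expr : String) (out : Option String × Option (List String)) : Prop := out = parse_function_call_py_alt expr
instance (expr : String) (out : Option String × Option (List String)) : Decidable (Spec_parse_function_call_py expr out) := by unfold Spec_parse_function_call_py; infer_instance

-- ===== CLAIM =====
def Claim_equal_parse_function_call_py : Prop := ∀ (expr : String), Dom_parse_function_call_py expr → Spec_parse_function_call_py expr (parse_function_call_py expr)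

-- ===== LEMMAS AND PROOFS =====

theorem pvDepths_length (l : List Char) (d : Int) : (pvDepths l d).length = l.length := by
  induction l generalizing d with
  | nil => rfl
  | cons c rest ih => simp [pvDepths, ih]

theorem pvDepths_take (l : List Char) (d : Int) (n : Nat) :
    pvDepths (l.take n) d = (pvDepths l d).take n := by
  induction l generalizing d n with
  | nil => simp [pvDepths]
  | cons c rest ih =>
    cases n with
    | zero => simp [pvDepths]
    | succ m => simp [pvDepths, ih]

theorem idxOf?_cons (a : Int) (l : List Int) :
    (a :: l).idxOf? 0 = if a = 0 then some 0 else (l.idxOf? 0).map (· + 1) := by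
  simp only [List.idxOf?, List.findIdx?_cons]
  by_cases h : a = 0 <;> simp [h]

theorem idxOf?_lt_length (l : List Int) (k : Nat) (h : l.idxOf? 0 = some k) : k < l.length := by
  induction l generalizing k with
  | nil => simp [List.idxOf?] at h
  | cons a t ih =>
    rw [idxOf?_cons] at h
    split at h
    · simp at h; subst h; simp
    · cases ht : t.idxOf? 0 with
      | none => simp [ht] at h
      | some m => rw [ht] at h; simp at h; subst h; simpa using Nat.succ_lt_succ (ih m ht)

-- A's first scan computes the first index at which the running depth hits 0
theorem findClose_eq (l : List Char) : ∀ (d : Int), 1 ≤ d →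
    pvFindClose l d = (pvDepths l d).idxOf? 0 := by
  induction l with
  | nil => intro d _; simp [pvFindClose, pvDepths, List.idxOf?]
  | cons c rest ih =>
    intro d hd
    by_cases ho : pvIsOpen c
    · have hcl : pvIsClose c = false := by
        simp only [pvIsOpen, Bool.or_eq_true, beq_iff_eq] at ho
        rcases ho with (h | h) | h <;> subst h <;> rfl
      have hd1 : pvDelta c = 1 := by simp [pvDelta, ho, hcl]
      simp only [pvFindClose, pvDepths, ho, if_true, hd1]
      rw [ih (d + 1) (by omega), idxOf?_cons, if_neg (show ¬(d + 1 = 0) by omega)]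
    · by_cases hc : pvIsClose c
      · have hd0 : pvDelta c = -1 := by simp [pvDelta, ho, hc]
        simp only [pvFindClose, pvDepths, ho, hc, Bool.false_eq_true, if_false, if_true, hd0]
        rw [idxOf?_cons]
        by_cases h1 : d = 1
        · subst h1; simp
        · have hb : (d - 1 == 0) = false := by simp; omega
          rw [hb, if_neg (show ¬(d + -1 = 0) by omega)]
          simp only [Bool.false_eq_true, if_false]
          rw [ih (d - 1) (by omega), show d + -1 = d - 1 from by ring]
      · have hd0 : pvDelta c = 0 := by simp [pvDelta, ho, hc]
        simp only [pvFindClose, pvDepths, ho, hc, Bool.false_eq_true, if_false, hd0, add_zero]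
        rw [ih d hd, idxOf?_cons, if_neg (show ¬(d = 0) by omega)]

-- the recursive form of B's comma-cut positions (depth-after starting from d)
def pvCuts : List Char → Int → List Nat
  | [], _ => []
  | c :: rest, d =>
    let d' := d + pvDelta c
    if c = ',' ∧ d' = 1 then 0 :: (pvCuts rest d').map (· + 1)
    else (pvCuts rest d').map (· + 1)

-- B's filter over index range computes pvCuts
theorem filter_eq_pvCuts (l : List Char) : ∀ (d : Int),
    (List.range l.length).filter
      (fun i => l[i]? == some ',' && (pvDepths l d)[i]? == some (1 : Int))
    = pvCuts l d := by
  induction l with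
  | nil => intro d; simp [pvCuts]
  | cons c rest ih =>
    intro d
    have hsucc : ∀ i : Nat,
        ((c :: rest)[i + 1]? == some ',' && (pvDepths (c :: rest) d)[i + 1]? == some (1 : Int))
        = (rest[i]? == some ',' && (pvDepths rest (d + pvDelta c))[i]? == some (1 : Int)) := by
      intro i; simp [pvDepths]
    simp only [List.length_cons, List.range_succ_eq_map, List.filter_cons, List.filter_map,
      Function.comp_def, hsucc, ih (d + pvDelta c)]
    by_cases h : c = ',' ∧ (d + pvDelta c) = 1
    · obtain ⟨hc, h1⟩ := h
      subst hc
      have hb : ((',' :: rest)[0]? == some ',' && (pvDepths (',' :: rest) d)[0]? == some (1 : Int)) = true := by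
        simp [pvDepths, h1]
      rw [hb]
      simp [pvCuts, h1]
    · have hb : ((c :: rest)[0]? == some ',' && (pvDepths (c :: rest) d)[0]? == some (1 : Int)) = false := by
        simp only [List.getElem?_cons_zero, pvDepths, Bool.and_eq_false_iff]
        by_cases hc : c = ','
        · right; simp; intro h1; exact h ⟨hc, by omega⟩
        · left; simp [hc]
      rw [hb]
      simp [pvCuts, h]

-- Core invariant: A's splitting scan equals B's slicing at the cut positions
theorem splitArgs_eq_slices (s : List Char) : ∀ (d : Int) (cur : List Char)
    (args : List (List Char)) (full : List Char) (start : Nat),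
    full.drop start = cur ++ s →
    pvSplitArgs s d cur args
      = args ++ pvSlices full ((pvCuts s (d + 1)).map (· + (start + cur.length))) start := by
  induction s with
  | nil =>
    intro d cur args full start h
    simp only [List.append_nil] at h
    simp only [pvSplitArgs, pvCuts, List.map_nil, pvSlices, h]
    split <;> simp
  | cons c rest ih =>
    intro d cur args full start h
    have hdropcur : (full.drop start).take cur.length = cur := by
      rw [h]; exact List.take_left
    by_cases ho : pvIsOpen c
    · have hnc : ¬(c = ',' ∧ d + 1 + 1 = 1) := by
        rintro ⟨hc', -⟩; subst hc'; simp [pvIsOpen] at ho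
      have hd1 : pvDelta c = 1 := by
        have hcl : pvIsClose c = false := by
          simp only [pvIsOpen, Bool.or_eq_true, beq_iff_eq] at ho
          rcases ho with (h | h) | h <;> subst h <;> rfl
        simp [pvDelta, ho, hcl]
      simp only [pvSplitArgs, ho, if_true, pvCuts, hd1, if_neg hnc]
      rw [ih (d + 1) (cur ++ [c]) args full start (by rw [h]; simp)]
      rw [List.map_map]
      congr 2
      apply List.map_congr_left
      intro x _
      simp [Function.comp]
      omega
    · by_cases hc : pvIsClose c
      · have hnc : ¬(c = ',' ∧ d + 1 + -1 = 1) := by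
          rintro ⟨hc', -⟩; subst hc'; simp [pvIsClose] at hc
        have hd1 : pvDelta c = -1 := by simp [pvDelta, ho, hc]
        simp only [pvSplitArgs, ho, hc, Bool.false_eq_true, if_false, if_true, pvCuts, hd1,
          if_neg hnc]
        rw [show d + 1 + -1 = d - 1 + 1 by ring]
        rw [ih (d - 1) (cur ++ [c]) args full start (by rw [h]; simp)]
        rw [List.map_map]
        congr 2
        apply List.map_congr_left
        intro x _
        simp [Function.comp]
        omega
      · have hd0 : pvDelta c = 0 := by simp [pvDelta, ho, hc]
        by_cases hcm : (c == ',' && d == 0) = true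
        · obtain ⟨hc', hd'⟩ : c = ',' ∧ d = 0 := by simpa using hcm
          subst hc'; subst hd'
          have hcuts : pvCuts (',' :: rest) (0 + 1) = 0 :: (pvCuts rest (0 + 1)).map (· + 1) := by
            simp [pvCuts, hd0]
          simp only [pvSplitArgs, ho, hc, Bool.false_eq_true, if_false, hcm, if_true, hcuts,
            List.map_cons, pvSlices]
          have h1 : full.drop (start + cur.length) = ',' :: rest := by
            have h2 : (full.drop start).drop cur.length = ',' :: rest := by
              rw [h, List.drop_left]
            rwa [List.drop_drop] at h2
          have hdrop2 : full.drop (start + cur.length + 1) = rest := by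
            have h3 : (full.drop (start + cur.length)).drop 1 = rest := by rw [h1]; rfl
            rwa [List.drop_drop] at h3
          rw [ih 0 [] (args ++ [PySem.Chars.strip cur]) full (start + cur.length + 1)
            (by simpa using hdrop2)]
          have htake : (full.drop start).take (0 + (start + cur.length) - start) = cur := by
            rw [show 0 + (start + cur.length) - start = cur.length by omega]; exact hdropcur
          rw [List.map_map]
          have hmap : (List.map ((fun x => x + (start + cur.length)) ∘ (· + 1))
              (pvCuts rest (0 + 1))) = (pvCuts rest (0 + 1)).map
                (· + (start + cur.length + 1 + List.length ([] : List Char))) := by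
            apply List.map_congr_left; intro x _; simp [Function.comp]; omega
          rw [hmap, htake]
          simp
        · have hnc : ¬(c = ',' ∧ d + 1 = 1) := by
            rintro ⟨hc', hd'⟩; subst hc'
            exact hcm (by simp; omega)
          simp only [pvSplitArgs, ho, hc, Bool.false_eq_true, if_false, hcm, pvCuts, hd0, add_zero,
            if_neg hnc]
          rw [ih d (cur ++ [c]) args full start (by rw [h]; simp)]
          rw [List.map_map]
          congr 2
          apply List.map_congr_left
          intro x _
          simp [Function.comp]
          omega

-- ===== VERDICT =====
theorem parse_function_call_py_spec : Claim_equal_parse_function_call_py := by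
  intro expr _
  unfold Spec_parse_function_call_py parse_function_call_py parse_function_call_py_alt
  cases he : PySem.Chars.strip expr.toList with
  | nil => rfl
  | cons c0 e' =>
    simp only []
    by_cases hin : PySem.Chars.isIn ['('] (c0 :: e') = true
    · simp only [hin]
      by_cases ha : PySem.Chars.isalpha c0 = true
      · simp only [ha]
        by_cases hid : pvIsIdentifier (PySem.Chars.strip
            ((c0 :: e').take (PySem.Chars.find (c0 :: e') ['(']).toNat)) = true
        · simp only [hid]
          rw [findClose_eq _ 1 (by omega)]
          cases hf : ((pvDepths ((c0 :: e').drop ((PySem.Chars.find (c0 :: e') ['(']).toNat + 1)) 1).idxOf? 0) with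
          | none => simp
          | some k =>
            simp only []
            cases hstrip : (PySem.Chars.strip
                (((c0 :: e').drop ((PySem.Chars.find (c0 :: e') ['(']).toNat + 1)).drop (k + 1))).isEmpty with
            | false => simp
            | true =>
              simp only [Bool.not_true, Bool.false_eq_true, if_false]
              have hk : k < ((c0 :: e').drop ((PySem.Chars.find (c0 :: e') ['(']).toNat + 1)).length := by
                have := idxOf?_lt_length _ _ hf
                rwa [pvDepths_length] at this
              -- abbreviations
              have hsec : pvSplitArgs (((c0 :: e').drop ((PySem.Chars.find (c0 :: e') ['(']).toNat + 1)).take k) 0 [] []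
                  = pvSlices (((c0 :: e').drop ((PySem.Chars.find (c0 :: e') ['(']).toNat + 1)).take k)
                      ((List.range k).filter (fun i =>
                        ((((c0 :: e').drop ((PySem.Chars.find (c0 :: e') ['(']).toNat + 1)).take k)[i]? == some ',')
                        && ((pvDepths ((c0 :: e').drop ((PySem.Chars.find (c0 :: e') ['(']).toNat + 1)) 1)[i]? == some (1 : Int)))) 0 := by
                set s := (c0 :: e').drop ((PySem.Chars.find (c0 :: e') ['(']).toNat + 1) with hs
                have hlen : (s.take k).length = k := by
                  rw [List.length_take]; omega
                have hfc : (List.range k).filter (fun i =>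
                      ((s.take k)[i]? == some ',') && ((pvDepths s 1)[i]? == some (1 : Int)))
                    = pvCuts (s.take k) 1 := by
                  rw [← filter_eq_pvCuts (s.take k) 1, hlen]
                  apply List.filter_congr
                  intro i hi
                  rw [List.mem_range] at hi
                  rw [pvDepths_take, List.getElem?_take_of_lt hi, List.getElem?_take_of_lt hi]
                rw [hfc]
                have := splitArgs_eq_slices (s.take k) 0 [] [] (s.take k) 0 (by simp)
                simpa using this
              rw [hsec]
        · simp [hid]
      · simp [ha]
    · simp [hin]
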